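-- pv_equiv track=rewrite | github.com/Artifact-Virtual/MAOS | base_index_reporting.py | _create_size_buckets
-- ===== SOURCE A (Python) =====
-- from typing import Dict, List, Optional, Any
--
-- def _create_size_buckets(sizes: List[int]) -> Dict:
--     """Create size distribution buckets."""
--     buckets = {
--         "< 10 KB": 0,
--         "10-100 KB": 0,
--         "100 KB - 1 MB": 0,
--         "1-10 MB": 0,
--         "> 10 MB": 0
--     }
--
--     for size in sizes:
--         if size < 10*1024:
--             buckets["< 10 KB"] += 1
--         elif size < 100*1024:
--             buckets["10-100 KB"] += 1
--         elif size < 1024*1024: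
--             buckets["100 KB - 1 MB"] += 1
--         elif size < 10*1024*1024:
--             buckets["1-10 MB"] += 1
--         else:
--             buckets["> 10 MB"] += 1
--
--     return buckets
-- ===== SOURCE B (Python) =====
-- def _create_size_buckets(sizes):
--     """Create size distribution buckets via cumulative threshold counts.
--
--     For each threshold t, count how many sizes are strictly below t (one pass
--     per threshold); each bucket is then the difference of adjacent cumulative
--     counts. Correct because the thresholds are increasing, so
--     #{t_{i-1} <= s < t_i} = #{s < t_i} - #{s < t_{i-1}}.
--     """
--     thresholds = [10*1024, 100*1024, 1024*1024, 10*1024*1024]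
--     labels = ["< 10 KB", "10-100 KB", "100 KB - 1 MB", "1-10 MB", "> 10 MB"]
--     cum = [sum(1 for s in sizes if s < t) for t in thresholds] + [len(sizes)]
--     return {lab: hi - lo for lab, lo, hi in zip(labels, [0] + cum, cum)}
--
-- if __name__ == "__main__":
--     print(_create_size_buckets([5, 10240, 200000, 2000000, 99999999, 10485760]))
-- ===== Notes on version B (the rewrite author's own statement) =====
-- stated objective: alternative
-- what changed: Instead of assigning each element to a bucket in one pass, B makes one counting pass per threshold to get cumulative counts (#sizes strictly below each threshold) and obtains every bucket as the difference of adjacent cumulative counts; no per-element bucket selection exists in B.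
import Mathlib
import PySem

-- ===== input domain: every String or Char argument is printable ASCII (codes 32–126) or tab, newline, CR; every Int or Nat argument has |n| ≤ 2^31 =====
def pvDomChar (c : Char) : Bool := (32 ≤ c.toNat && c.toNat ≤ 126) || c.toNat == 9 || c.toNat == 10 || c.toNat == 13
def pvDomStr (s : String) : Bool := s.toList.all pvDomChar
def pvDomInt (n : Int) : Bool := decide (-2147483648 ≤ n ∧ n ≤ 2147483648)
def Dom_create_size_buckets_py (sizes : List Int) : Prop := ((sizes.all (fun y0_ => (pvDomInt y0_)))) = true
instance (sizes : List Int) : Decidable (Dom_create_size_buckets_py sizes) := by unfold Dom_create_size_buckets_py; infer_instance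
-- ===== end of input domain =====

-- B replaces A's per-element if/elif bucketing by staged cumulative counting passes
-- (one count per threshold, buckets = differences); objective: alternative, same cost.

-- ===== PORT A =====
def pvAStep (b : PySem.Dict String Int) (size : Int) : PySem.Dict String Int :=
  if size < 10*1024 then b.insert "< 10 KB" (b.getD "< 10 KB" 0 + 1)
  else if size < 100*1024 then b.insert "10-100 KB" (b.getD "10-100 KB" 0 + 1)
  else if size < 1024*1024 then b.insert "100 KB - 1 MB" (b.getD "100 KB - 1 MB" 0 + 1)
  else if size < 10*1024*1024 then b.insert "1-10 MB" (b.getD "1-10 MB" 0 + 1)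
  else b.insert "> 10 MB" (b.getD "> 10 MB" 0 + 1)

def create_size_buckets_py (sizes : List Int) : List (String × Int) :=
  let buckets : PySem.Dict String Int :=
    PySem.Dict.mk [("< 10 KB", 0), ("10-100 KB", 0), ("100 KB - 1 MB", 0), ("1-10 MB", 0), ("> 10 MB", 0)]
  (sizes.foldl pvAStep buckets).items

-- ===== PORT B =====
-- sum(1 for s in sizes if s < t)
def pvCumBelow (sizes : List Int) (t : Int) : Int :=
  ((sizes.countP (fun s => decide (s < t)) : Nat) : Int)

def pvLabels : List String := ["< 10 KB", "10-100 KB", "100 KB - 1 MB", "1-10 MB", "> 10 MB"]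

def create_size_buckets_py_alt (sizes : List Int) : List (String × Int) :=
  let cum : List Int :=
    ([10*1024, 100*1024, 1024*1024, 10*1024*1024].map (pvCumBelow sizes)) ++ [(sizes.length : Int)]
  pvLabels.zip (List.zipWith (fun hi lo => hi - lo) cum (0 :: cum))

-- ===== PRECONDITION & SPEC =====
def Spec_create_size_buckets_py (sizes : List Int) (out : List (String × Int)) : Prop := out = create_size_buckets_py_alt sizes
instance (sizes : List Int) (out : List (String × Int)) : Decidable (Spec_create_size_buckets_py sizes out) := by unfold Spec_create_size_buckets_py; infer_instance

-- ===== CLAIM (what is proved, stated in full; the proofs are below) =====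
def Claim_equal_create_size_buckets_py : Prop := ∀ (sizes : List Int), Dom_create_size_buckets_py sizes → Spec_create_size_buckets_py sizes (create_size_buckets_py sizes)

-- ===== LEMMAS AND PROOFS =====

lemma pvInv (sizes : List Int) : ∀ c0 c1 c2 c3 c4 : Int,
    (sizes.foldl pvAStep (PySem.Dict.mk [("< 10 KB", c0), ("10-100 KB", c1), ("100 KB - 1 MB", c2), ("1-10 MB", c3), ("> 10 MB", c4)])).items
      = [("< 10 KB", c0 + pvCumBelow sizes 10240),
         ("10-100 KB", c1 + (pvCumBelow sizes 102400 - pvCumBelow sizes 10240)),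
         ("100 KB - 1 MB", c2 + (pvCumBelow sizes 1048576 - pvCumBelow sizes 102400)),
         ("1-10 MB", c3 + (pvCumBelow sizes 10485760 - pvCumBelow sizes 1048576)),
         ("> 10 MB", c4 + ((sizes.length : Int) - pvCumBelow sizes 10485760))] := by
  induction sizes with
  | nil => intro c0 c1 c2 c3 c4; simp [pvCumBelow]
  | cons s rest ih =>
    intro c0 c1 c2 c3 c4
    simp only [List.foldl_cons]
    have hc : ∀ t : Int, pvCumBelow (s :: rest) t
        = pvCumBelow rest t + (if s < t then 1 else 0) := by
      intro t
      by_cases h : s < t <;> simp [pvCumBelow, h]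
    by_cases h1 : s < 10240
    · have : pvAStep (PySem.Dict.mk [("< 10 KB", c0), ("10-100 KB", c1), ("100 KB - 1 MB", c2), ("1-10 MB", c3), ("> 10 MB", c4)]) s
          = PySem.Dict.mk [("< 10 KB", c0 + 1), ("10-100 KB", c1), ("100 KB - 1 MB", c2), ("1-10 MB", c3), ("> 10 MB", c4)] := by
        simp [pvAStep, h1, PySem.Dict.insert, PySem.Dict.getD, PySem.Dict.get?]
      rw [this, ih]
      simp [hc, h1, show s < 102400 by omega, show s < 1048576 by omega, show s < 10485760 by omega]
      omega
    · by_cases h2 : s < 102400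
      · have : pvAStep (PySem.Dict.mk [("< 10 KB", c0), ("10-100 KB", c1), ("100 KB - 1 MB", c2), ("1-10 MB", c3), ("> 10 MB", c4)]) s
            = PySem.Dict.mk [("< 10 KB", c0), ("10-100 KB", c1 + 1), ("100 KB - 1 MB", c2), ("1-10 MB", c3), ("> 10 MB", c4)] := by
          simp [pvAStep, h1, h2, PySem.Dict.insert, PySem.Dict.getD, PySem.Dict.get?]
        rw [this, ih]
        simp [hc, h1, h2, show s < 1048576 by omega, show s < 10485760 by omega]
        omega
      · by_cases h3 : s < 1048576
        · have : pvAStep (PySem.Dict.mk [("< 10 KB", c0), ("10-100 KB", c1), ("100 KB - 1 MB", c2), ("1-10 MB", c3), ("> 10 MB", c4)]) s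
              = PySem.Dict.mk [("< 10 KB", c0), ("10-100 KB", c1), ("100 KB - 1 MB", c2 + 1), ("1-10 MB", c3), ("> 10 MB", c4)] := by
            simp [pvAStep, h1, h2, h3, PySem.Dict.insert, PySem.Dict.getD, PySem.Dict.get?]
          rw [this, ih]
          simp [hc, h1, h2, h3, show s < 10485760 by omega]
          omega
        · by_cases h4 : s < 10485760
          · have : pvAStep (PySem.Dict.mk [("< 10 KB", c0), ("10-100 KB", c1), ("100 KB - 1 MB", c2), ("1-10 MB", c3), ("> 10 MB", c4)]) s
                = PySem.Dict.mk [("< 10 KB", c0), ("10-100 KB", c1), ("100 KB - 1 MB", c2), ("1-10 MB", c3 + 1), ("> 10 MB", c4)] := by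
              simp [pvAStep, h1, h2, h3, h4, PySem.Dict.insert, PySem.Dict.getD, PySem.Dict.get?]
            rw [this, ih]
            simp [hc, h1, h2, h3, h4]
            omega
          · have : pvAStep (PySem.Dict.mk [("< 10 KB", c0), ("10-100 KB", c1), ("100 KB - 1 MB", c2), ("1-10 MB", c3), ("> 10 MB", c4)]) s
                = PySem.Dict.mk [("< 10 KB", c0), ("10-100 KB", c1), ("100 KB - 1 MB", c2), ("1-10 MB", c3), ("> 10 MB", c4 + 1)] := by
              simp [pvAStep, h1, h2, h3, h4, PySem.Dict.insert, PySem.Dict.getD, PySem.Dict.get?]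
            rw [this, ih]
            simp [hc, h1, h2, h3, h4]
            omega

-- ===== VERDICT (by name: the statement is the Claim_ definition above) =====
theorem create_size_buckets_py_spec : Claim_equal_create_size_buckets_py := by
  intro sizes _
  show create_size_buckets_py sizes = create_size_buckets_py_alt sizes
  show (List.foldl pvAStep (PySem.Dict.mk [("< 10 KB", 0), ("10-100 KB", 0), ("100 KB - 1 MB", 0), ("1-10 MB", 0), ("> 10 MB", 0)]) sizes).items = _
  rw [pvInv]
  simp [create_size_buckets_py_alt, pvLabels]
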